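-- pv_equiv track=rewrite | github.com/minkaas/AdventOfCode_2 | 2024/Day22/Day22.py | do_seq_test
-- ===== SOURCE A (Python) =====
-- def prune(number):
--     return number % 16777216
--
-- def mix(result, number):
--     return result ^ number
--
-- def stupid_solution(secret_num):
--     value = secret_num * 64
--     secret_num = prune(mix(value, secret_num))
--     value = secret_num // 32
--     secret_num = prune(mix(value, secret_num))
--     value = secret_num * 2048
--     secret_num = prune(mix(value, secret_num))
--     return secret_num
--
-- def do_seq_test(secret_num, to_sequence):
--     numone = secret_num % 10
--     numtwo = stupid_solution(secret_num)
--     numthree = stupid_solution(numtwo)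
--     numfour = stupid_solution(numthree)
--     sequence = [numtwo % 10 - numone, numthree % 10 - numtwo % 10, numfour % 10 - numthree % 10]
--     previous = numfour
--     current = stupid_solution(previous)
--     for i in range(0, 1996):
--         sequence.append(current % 10 - previous % 10)
--         if sequence == to_sequence:
--             return current % 10
--         sequence.pop(0)
--         previous, current = current, stupid_solution(current)
--     return 0
-- ===== SOURCE B (Python) =====
-- def next_secret(s):
--     s = (s ^ (s * 64)) % 16777216
--     s = (s ^ (s // 32)) % 16777216
--     s = (s ^ (s * 2048)) % 16777216
--     return s
--
-- def do_seq_test(secret_num, to_sequence):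
--     secrets = [secret_num]
--     s = secret_num
--     for _ in range(1999):
--         s = next_secret(s)
--         secrets.append(s)
--     prices = [x % 10 for x in secrets]
--     diffs = [b - a for a, b in zip(prices, prices[1:])]
--     for i in range(1996):
--         if diffs[i:i+4] == to_sequence:
--             return prices[i + 4]
--     return 0
-- ===== Notes on version B (the rewrite author's own statement) =====
-- stated objective: alternative
-- what changed: B precomputes the full 2000-secret list, a prices array and a consecutive-diffs array, then scans the 1996 window positions with slice comparisons, instead of A's fused loop that regenerates secrets while maintaining a rolling 4-element append/pop window.
import Mathlib
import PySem

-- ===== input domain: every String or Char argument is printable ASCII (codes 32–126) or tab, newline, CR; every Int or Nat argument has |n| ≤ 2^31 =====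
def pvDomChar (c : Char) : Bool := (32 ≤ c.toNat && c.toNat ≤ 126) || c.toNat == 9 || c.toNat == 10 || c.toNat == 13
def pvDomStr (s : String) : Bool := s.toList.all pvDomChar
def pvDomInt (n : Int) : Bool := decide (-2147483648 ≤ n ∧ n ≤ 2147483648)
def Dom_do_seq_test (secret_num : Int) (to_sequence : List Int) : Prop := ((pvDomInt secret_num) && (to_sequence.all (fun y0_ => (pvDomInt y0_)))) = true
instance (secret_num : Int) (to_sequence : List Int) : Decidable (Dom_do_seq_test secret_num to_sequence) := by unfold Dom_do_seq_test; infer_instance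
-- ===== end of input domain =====

-- B separates generation from search: it precomputes the 2000-secret list, a prices list and a
-- diffs list, then scans window positions with slices, instead of A's fused rolling-window loop
-- (objective: alternative decomposition, same asymptotic cost).


-- ===== PORT A =====
def pvPrune (number : Int) : Int := PySem.Int.mod number 16777216

def pvMix (result number : Int) : Int := PySem.Int.bxor result number

def pvStupidSolution (secret_num : Int) : Int :=
  let value1 := secret_num * 64
  let s1 := pvPrune (pvMix value1 secret_num)
  let value2 := PySem.Int.floordiv s1 32
  let s2 := pvPrune (pvMix value2 s1)
  let value3 := s2 * 2048
  pvPrune (pvMix value3 s2)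

-- the 'for i in range(0, 1996)' loop of A with its rolling state (sequence, previous, current);
-- the index i is unused in the body, so the fuel is the remaining iteration count.
-- sequence.pop(0) acts on a nonempty list, so it is List.tail.
def pvLoopA (tos : List Int) : Nat → List Int → Int → Int → Int
  | 0, _, _, _ => 0
  | n + 1, seq, prev, cur =>
    let seq' := seq ++ [PySem.Int.mod cur 10 - PySem.Int.mod prev 10]
    if seq' = tos then PySem.Int.mod cur 10
    else pvLoopA tos n seq'.tail cur (pvStupidSolution cur)

def do_seq_test (secret_num : Int) (to_sequence : List Int) : Int :=
  let numone := PySem.Int.mod secret_num 10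
  let numtwo := pvStupidSolution secret_num
  let numthree := pvStupidSolution numtwo
  let numfour := pvStupidSolution numthree
  let sequence := [PySem.Int.mod numtwo 10 - numone,
                   PySem.Int.mod numthree 10 - PySem.Int.mod numtwo 10,
                   PySem.Int.mod numfour 10 - PySem.Int.mod numthree 10]
  pvLoopA to_sequence 1996 sequence numfour (pvStupidSolution numfour)

-- ===== PORT B =====
def pvNextSecret (s : Int) : Int :=
  let a := PySem.Int.mod (PySem.Int.bxor s (s * 64)) 16777216
  let b := PySem.Int.mod (PySem.Int.bxor a (PySem.Int.floordiv a 32)) 16777216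
  PySem.Int.mod (PySem.Int.bxor b (b * 2048)) 16777216

-- B's generation loop 'secrets = [secret_num]; for _ in range(1999): s = next_secret(s); secrets.append(s)':
-- appends in order, so the cons-recursion builds the identical list front to back.
def pvGenSecrets : Int → Nat → List Int
  | s, 0 => [s]
  | s, n + 1 => s :: pvGenSecrets (pvNextSecret s) n

-- B's 'for i in range(1996)' search loop; prices[i+4] is always in range (i ≤ 1995, len prices = 2000),
-- ported with pyGetD.
def pvSearchB (diffs prices tos : List Int) : List Int → Int
  | [] => 0
  | i :: rest =>
    if PySem.List.slice diffs (some i) (some (i + 4)) = tos then PySem.List.pyGetD prices (i + 4) 0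
    else pvSearchB diffs prices tos rest

def do_seq_test_alt (secret_num : Int) (to_sequence : List Int) : Int :=
  let secrets := pvGenSecrets secret_num 1999
  let prices := secrets.map (fun x => PySem.Int.mod x 10)
  let diffs := (prices.zip (PySem.List.slice prices (some 1) none)).map (fun p => p.2 - p.1)
  pvSearchB diffs prices to_sequence (PySem.List.pyRange 0 1996)

-- ===== PRECONDITION & SPEC =====
def Spec_do_seq_test (secret_num : Int) (to_sequence : List Int) (out : Int) : Prop := out = do_seq_test_alt secret_num to_sequence
instance (secret_num : Int) (to_sequence : List Int) (out : Int) : Decidable (Spec_do_seq_test secret_num to_sequence out) := by unfold Spec_do_seq_test; infer_instance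

-- ===== CLAIM (what is proved, stated in full; the proofs are below) =====
def Claim_equal_do_seq_test : Prop := ∀ (secret_num : Int) (to_sequence : List Int), Dom_do_seq_test secret_num to_sequence → Spec_do_seq_test secret_num to_sequence (do_seq_test secret_num to_sequence)

-- ===== LEMMAS AND PROOFS =====

-- the two recurrence steps compute the same value (xor arguments are swapped)
theorem pvStep_eq (s : Int) : pvStupidSolution s = pvNextSecret s := by
  unfold pvStupidSolution pvNextSecret pvPrune pvMix
  simp only [PySem.Int.bxor_comm]

-- proof-side views of the secret stream starting AFTER s
def pvDiffsFrom (s : Int) : Nat → List Int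
  | 0 => []
  | n + 1 =>
    (PySem.Int.mod (pvNextSecret s) 10 - PySem.Int.mod s 10) :: pvDiffsFrom (pvNextSecret s) n

def pvPricesFrom (s : Int) : Nat → List Int
  | 0 => []
  | n + 1 => PySem.Int.mod (pvNextSecret s) 10 :: pvPricesFrom (pvNextSecret s) n

-- common abstract search both loops reduce to
theorem pvDiffsFrom_succ (s : Int) (n : Nat) :
    pvDiffsFrom s (n + 1)
      = (PySem.Int.mod (pvNextSecret s) 10 - PySem.Int.mod s 10) :: pvDiffsFrom (pvNextSecret s) n := rfl

theorem pvPricesFrom_succ (s : Int) (n : Nat) :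
    pvPricesFrom s (n + 1) = PySem.Int.mod (pvNextSecret s) 10 :: pvPricesFrom (pvNextSecret s) n := rfl

def pvSearchS (tos : List Int) : Nat → List Int → List Int → Int
  | 0, _, _ => 0
  | n + 1, ds, ps => if ds.take 4 = tos then ps.headD 0 else pvSearchS tos n ds.tail ps.tail

theorem pvSearchS_succ (tos ds ps : List Int) (n : Nat) :
    pvSearchS tos (n + 1) ds ps
      = if ds.take 4 = tos then ps.headD 0 else pvSearchS tos n ds.tail ps.tail := rfl

theorem take4_cons (w x y z : Int) (l : List Int) : (w :: x :: y :: z :: l).take 4 = [w, x, y, z] := rfl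

-- A's rolling loop equals the abstract search on the precomputed streams
theorem pvLoopA_eq (tos : List Int) :
    ∀ (n : Nat) (s a b c : Int),
      pvLoopA tos n [a, b, c] s (pvStupidSolution s)
        = pvSearchS tos n (a :: b :: c :: pvDiffsFrom s n) (pvPricesFrom s n) := by
  intro n
  induction n with
  | zero => intro s a b c; rfl
  | succ n ih =>
    intro s a b c
    rw [pvStep_eq s]
    show (if [a, b, c] ++ [PySem.Int.mod (pvNextSecret s) 10 - PySem.Int.mod s 10] = tos
          then PySem.Int.mod (pvNextSecret s) 10
          else pvLoopA tos n ([a, b, c] ++ [PySem.Int.mod (pvNextSecret s) 10 - PySem.Int.mod s 10]).tail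
                 (pvNextSecret s) (pvStupidSolution (pvNextSecret s))) = _
    simp only [pvDiffsFrom, pvPricesFrom, pvSearchS, take4_cons, List.cons_append, List.nil_append,
      List.tail_cons, List.headD_cons]
    split_ifs with h
    · rfl
    · exact ih (pvNextSecret s) b c _

-- B's generated prices list is the head price consed onto the stream view
theorem pvMapGen : ∀ (n : Nat) (s : Int),
    (pvGenSecrets s n).map (fun x => PySem.Int.mod x 10)
      = PySem.Int.mod s 10 :: pvPricesFrom s n := by
  intro n
  induction n with
  | zero => intro s; rfl
  | succ n ih => intro s; simp only [pvGenSecrets, List.map_cons, ih, pvPricesFrom]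

-- B's zipped diff list equals the diff stream view
theorem pvZipDiffs : ∀ (n : Nat) (s : Int),
    ((PySem.Int.mod s 10 :: pvPricesFrom s n).zip (pvPricesFrom s n)).map (fun p => p.2 - p.1)
      = pvDiffsFrom s n := by
  intro n
  induction n with
  | zero => intro s; rfl
  | succ n ih =>
    intro s
    simp only [pvPricesFrom, List.zip_cons_cons, List.map_cons, pvDiffsFrom]
    exact congrArg _ (ih (pvNextSecret s))

theorem getD_eq_headD_drop (l : List Int) (n : Nat) : l.getD n 0 = (l.drop n).headD 0 := by
  simp [List.getD_eq_getElem?_getD, List.headD_eq_head?_getD, List.head?_drop]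

-- B's index loop equals the abstract search on suffixes
theorem pvSearchB_eq (ds ps tos : List Int) :
    ∀ (m k : Nat), (k : Int) + m = 1996 →
      pvSearchB ds ps tos (PySem.List.pyRange k 1996)
        = pvSearchS tos m (ds.drop k) (ps.drop (k + 4)) := by
  intro m
  induction m with
  | zero =>
    intro k hk
    rw [PySem.List.pyRange_one_eq_nil (by omega)]
    rfl
  | succ m ih =>
    intro k hk
    have hklt : (k : Int) < 1996 := by push_cast at hk ⊢; omega
    rw [PySem.List.pyRange_one_cons hklt]
    show (if PySem.List.slice ds (some (k : Int)) (some ((k : Int) + 4)) = tos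
          then PySem.List.pyGetD ps ((k : Int) + 4) 0
          else pvSearchB ds ps tos (PySem.List.pyRange ((k : Int) + 1) 1996)) = _
    have hc4 : (k : Int) + 4 = ((k + 4 : Nat) : Int) := by push_cast; ring
    have hc1 : (k : Int) + 1 = ((k + 1 : Nat) : Int) := by push_cast; ring
    rw [hc4, PySem.List.slice_natCast, PySem.List.pyGetD_natCast, hc1,
      ih (k + 1) (by push_cast at hk ⊢; omega)]
    have ht : k + 4 - k = 4 := by omega
    rw [ht, pvSearchS_succ, List.tail_drop, List.tail_drop, getD_eq_headD_drop,
      show k + 4 + 1 = k + 1 + 4 from by omega]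

-- ===== VERDICT (by name: the statement is the Claim_ definition above) =====
theorem do_seq_test_spec : Claim_equal_do_seq_test := by
  intro s tos _
  unfold Spec_do_seq_test do_seq_test do_seq_test_alt
  dsimp only
  rw [pvLoopA_eq, PySem.List.slice_from_one, pvMapGen, List.tail_cons, pvZipDiffs]
  have h := pvSearchB_eq (pvDiffsFrom s 1999) (PySem.Int.mod s 10 :: pvPricesFrom s 1999) tos 1996 0
    (by norm_num)
  simp only [Nat.cast_zero, List.drop_zero] at h
  rw [h]
  simp only [pvStep_eq]
  conv_rhs => rw [show (0 + 4 : Nat) = 3 + 1 from rfl, List.drop_succ_cons,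
    pvDiffsFrom_succ, pvDiffsFrom_succ, pvDiffsFrom_succ,
    pvPricesFrom_succ, pvPricesFrom_succ, pvPricesFrom_succ,
    show (3 : Nat) = 2 + 1 from rfl, List.drop_succ_cons,
    show (2 : Nat) = 1 + 1 from rfl, List.drop_succ_cons,
    show (1 : Nat) = 0 + 1 from rfl, List.drop_succ_cons, List.drop_zero]
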